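-- pv_equiv track=rewrite | github.com/xiaodanhu/AF_Hierarchy | data_scripts/finegym/generate_instruction_data.py | build_hierarchical_prompt
-- ===== SOURCE A (Python) =====
-- from typing import Dict, List, Tuple
--
-- def get_activity_from_phrase(phrase_id: int) -> int:
--     """Get activity ID from phrase ID."""
--     if phrase_id == 0:
--         return 0  # Vault
--     elif 1 <= phrase_id <= 4:
--         return 1  # Floor Exercise
--     elif 5 <= phrase_id <= 9:
--         return 2  # Balance Beam
--     elif 10 <= phrase_id <= 13:
--         return 3  # Uneven Bars
--     return -1
--
-- def build_hierarchical_prompt(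
--         activity_map: Dict[int, str],
--         phrase_map: Dict[int, str],
--         action_map: Dict[int, Tuple],
--         set_to_phrase: Dict[int, int]
-- ) -> str:
--     """Build hierarchical human prompt organized by activity and phrase."""
--
--     # Group actions by activity and phrase
--     hierarchy = {}  # activity_id -> phrase_id -> [(action_id, action_name), ...]
--
--     for action_id, (set_id, action_name) in action_map.items():
--         phrase_id = set_to_phrase.get(set_id)
--         if phrase_id is None:
--             continue
--
--         activity_id = get_activity_from_phrase(phrase_id)
--         if activity_id == -1:
--             continue
--
--         if activity_id not in hierarchy:
--             hierarchy[activity_id] = {}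
--         if phrase_id not in hierarchy[activity_id]:
--             hierarchy[activity_id][phrase_id] = []
--
--         hierarchy[activity_id][phrase_id].append((action_id, action_name))
--
--     # Build prompt
--     prompt_lines = [
--         "<video>",
--         "Task: Analyze the gymnastics routine. Locate the hierarchical activities and actions.",
--         "",
--         "### Definitions & Hierarchy",
--     ]
--
--     # Generate for each activity
--     for activity_id in sorted(hierarchy.keys()):
--         activity_name = activity_map[activity_id]
--         prompt_lines.append(f"**Activity: <a{activity_id}> {activity_name}**")
--
--         # Generate for each phrase within this activity
--         for phrase_id in sorted(hierarchy[activity_id].keys()):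
--             phrase_name = phrase_map.get(phrase_id, "Unknown")
--             prompt_lines.append(f"  [Phrase: <p{phrase_id:02d}> ({phrase_name})]")
--             prompt_lines.append("  Actions:")
--
--             # List all actions in this phrase
--             for action_id, action_name in hierarchy[activity_id][phrase_id]:
--                 prompt_lines.append(f"    - <c{action_id:02d}>: {action_name}")
--
--             prompt_lines.append("")  # Empty line after each phrase
--
--     # Add instructions
--     prompt_lines.extend([
--         "### Instructions",
--         "1. Output valid JSON.",
--         "2. Identify the Activity ID (e.g., <a0>) and its total time span.",
--         "3. List all atomic Actions chronologically.",
--         "4. For each action, predict [Phrase_ID, Action_ID] (e.g., [<p00>, <c02>]) and the time span.",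
--         "5. Time Format: Use \"<s.s seconds>\" inside a list [start, end]."
--     ])
--
--     return "\n".join(prompt_lines)
-- ===== SOURCE B (Python) =====
-- # B: no nested dicts and no sort — the activity/phrase taxonomy is fixed (a0:p0, a1:p1-4,
-- # a2:p5-9, a3:p10-13), so iterate it directly and filter action_map per phrase.
--
-- _PHRASES = {0: [0], 1: [1, 2, 3, 4], 2: [5, 6, 7, 8, 9], 3: [10, 11, 12, 13]}
--
-- def build_hierarchical_prompt(activity_map, phrase_map, action_map, set_to_phrase):
--     lines = [
--         "<video>",
--         "Task: Analyze the gymnastics routine. Locate the hierarchical activities and actions.",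
--         "",
--         "### Definitions & Hierarchy",
--     ]
--     for activity_id in range(4):
--         body = []
--         for phrase_id in _PHRASES[activity_id]:
--             acts = [(aid, name) for aid, (sid, name) in action_map.items()
--                     if set_to_phrase.get(sid) == phrase_id]
--             if not acts:
--                 continue
--             body.append(f"  [Phrase: <p{phrase_id:02d}> ({phrase_map.get(phrase_id, 'Unknown')})]")
--             body.append("  Actions:")
--             body.extend(f"    - <c{aid:02d}>: {name}" for aid, name in acts)
--             body.append("")
--         if body:
--             lines.append(f"**Activity: <a{activity_id}> {activity_map[activity_id]}**")
--             lines.extend(body)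
--     lines.extend([
--         "### Instructions",
--         "1. Output valid JSON.",
--         "2. Identify the Activity ID (e.g., <a0>) and its total time span.",
--         "3. List all atomic Actions chronologically.",
--         "4. For each action, predict [Phrase_ID, Action_ID] (e.g., [<p00>, <c02>]) and the time span.",
--         "5. Time Format: Use \"<s.s seconds>\" inside a list [start, end]."
--     ])
--     return "\n".join(lines)
-- ===== Notes on version B (the rewrite author's own statement) =====
-- stated objective: simpler
-- what changed: B drops the nested hierarchy dict and the key sorts entirely: since get_activity_from_phrase encodes a fixed taxonomy (activities 0-3 with phrase ranges [0],[1-4],[5-9],[10-13]), B iterates that taxonomy in order and filters action_map once per phrase, skipping empty phrases/activities.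
import Mathlib
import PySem

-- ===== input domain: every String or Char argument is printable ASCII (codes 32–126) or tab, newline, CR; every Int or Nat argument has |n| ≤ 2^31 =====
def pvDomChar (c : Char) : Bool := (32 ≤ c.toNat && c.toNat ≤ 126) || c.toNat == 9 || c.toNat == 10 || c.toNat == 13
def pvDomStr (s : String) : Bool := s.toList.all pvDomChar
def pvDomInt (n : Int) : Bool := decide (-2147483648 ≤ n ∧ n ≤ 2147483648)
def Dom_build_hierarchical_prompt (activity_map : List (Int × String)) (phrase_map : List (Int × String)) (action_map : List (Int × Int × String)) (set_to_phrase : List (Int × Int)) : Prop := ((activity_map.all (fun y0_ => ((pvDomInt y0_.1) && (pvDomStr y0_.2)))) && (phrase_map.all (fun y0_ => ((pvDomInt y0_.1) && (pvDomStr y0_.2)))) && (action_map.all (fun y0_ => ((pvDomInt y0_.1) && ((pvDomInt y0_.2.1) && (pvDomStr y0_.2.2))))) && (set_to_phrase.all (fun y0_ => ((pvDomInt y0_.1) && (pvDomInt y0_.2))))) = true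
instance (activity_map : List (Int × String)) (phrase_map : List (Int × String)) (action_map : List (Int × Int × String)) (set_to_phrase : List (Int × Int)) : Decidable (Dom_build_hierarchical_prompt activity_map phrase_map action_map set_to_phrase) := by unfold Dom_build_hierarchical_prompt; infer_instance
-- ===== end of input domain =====

-- B replaces A's nested grouping dict + sorted() passes by a direct walk over the fixed
-- activity/phrase taxonomy, filtering action_map per phrase; return values agree on Pre_.

-- shared formatting helpers (identical f-string literals in both Pythons)
-- f"{n:02d}"  — exact for every int: Python left-pads with '0' to width 2 only for 0..9
def fmt02 (n : Int) : String := if 0 ≤ n ∧ n ≤ 9 then "0" ++ PySem.Int.toStr n else PySem.Int.toStr n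
-- f"**Activity: <a{aid}> {activity_map[aid]}**" — activity_map[aid]; KeyError excluded by Pre_,
-- so the "" default is never read on admitted inputs
def pvActivityLine (activity_map : List (Int × String)) (aid : Int) : String :=
  "**Activity: <a" ++ PySem.Int.toStr aid ++ "> " ++ (PySem.Dict.mk activity_map).getD aid "" ++ "**"
def pvPhraseLine (phrase_map : List (Int × String)) (pid : Int) : String :=
  "  [Phrase: <p" ++ fmt02 pid ++ "> (" ++ (PySem.Dict.mk phrase_map).getD pid "Unknown" ++ ")]"
def pvActionLine (a : Int × String) : String := "    - <c" ++ fmt02 a.1 ++ ">: " ++ a.2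
def pvHeader : List String :=
  ["<video>",
   "Task: Analyze the gymnastics routine. Locate the hierarchical activities and actions.",
   "",
   "### Definitions & Hierarchy"]
def pvInstr : List String :=
  ["### Instructions",
   "1. Output valid JSON.",
   "2. Identify the Activity ID (e.g., <a0>) and its total time span.",
   "3. List all atomic Actions chronologically.",
   "4. For each action, predict [Phrase_ID, Action_ID] (e.g., [<p00>, <c02>]) and the time span.",
   "5. Time Format: Use \"<s.s seconds>\" inside a list [start, end]."]

-- ===== PORT A =====
def get_activity_from_phrase (phrase_id : Int) : Int :=
  if phrase_id = 0 then 0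
  else if 1 ≤ phrase_id ∧ phrase_id ≤ 4 then 1
  else if 5 ≤ phrase_id ∧ phrase_id ≤ 9 then 2
  else if 10 ≤ phrase_id ∧ phrase_id ≤ 13 then 3
  else -1

-- one iteration of A's grouping loop over action_map.items()
def pvHierStep (set_to_phrase : List (Int × Int))
    (h : PySem.Dict Int (PySem.Dict Int (List (Int × String)))) (e : Int × Int × String) :
    PySem.Dict Int (PySem.Dict Int (List (Int × String))) :=
  match (PySem.Dict.mk set_to_phrase).get? e.2.1 with
  | none => h
  | some pid =>
    let aid := get_activity_from_phrase pid
    if aid = -1 then h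
    else
      let inner := h.getD aid PySem.Dict.empty
      h.insert aid (inner.insert pid (inner.getD pid [] ++ [(e.1, e.2.2)]))

def build_hierarchical_prompt (activity_map : List (Int × String)) (phrase_map : List (Int × String)) (action_map : List (Int × Int × String)) (set_to_phrase : List (Int × Int)) : String :=
  let hierarchy := action_map.foldl (pvHierStep set_to_phrase) PySem.Dict.empty
  let prompt_lines := pvHeader
  let prompt_lines :=
    (PySem.List.sorted hierarchy.keys (fun x => x) false).foldl (fun ls aid =>
      let ls := ls ++ [pvActivityLine activity_map aid]
      let inner := hierarchy.getD aid PySem.Dict.empty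
      (PySem.List.sorted inner.keys (fun x => x) false).foldl (fun ls pid =>
        let ls := ls ++ [pvPhraseLine phrase_map pid, "  Actions:"]
        let ls := (inner.getD pid []).foldl (fun ls a => ls ++ [pvActionLine a]) ls
        ls ++ [""]) ls) prompt_lines
  PySem.Str.join "\n" (prompt_lines ++ pvInstr)

-- ===== PORT B =====
-- _PHRASES[aid] : the fixed phrase range of each activity
def pvPhrasesOf (aid : Int) : List Int :=
  if aid = 0 then [0] else if aid = 1 then [1, 2, 3, 4]
  else if aid = 2 then [5, 6, 7, 8, 9] else [10, 11, 12, 13]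

-- the list comprehension: actions of action_map whose set maps to this phrase
def pvActs (set_to_phrase : List (Int × Int)) (action_map : List (Int × Int × String)) (pid : Int) : List (Int × String) :=
  action_map.filterMap (fun e =>
    if (PySem.Dict.mk set_to_phrase).get? e.2.1 = some pid then some (e.1, e.2.2) else none)

def build_hierarchical_prompt_alt (activity_map : List (Int × String)) (phrase_map : List (Int × String)) (action_map : List (Int × Int × String)) (set_to_phrase : List (Int × Int)) : String :=
  let lines :=
    ([0, 1, 2, 3] : List Int).foldl (fun ls aid =>   -- range(4)
      let body :=
        (pvPhrasesOf aid).foldl (fun body pid =>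
          let acts := pvActs set_to_phrase action_map pid
          if acts = [] then body
          else body ++ pvPhraseLine phrase_map pid :: "  Actions:" :: acts.map pvActionLine ++ [""]) []
      if body = [] then ls
      else ls ++ pvActivityLine activity_map aid :: body) pvHeader
  PySem.Str.join "\n" (lines ++ pvInstr)

-- ===== PRECONDITION & SPEC =====
-- Pre_ excludes exactly the inputs on which A raises KeyError: some action's set maps to a
-- phrase 0..13 whose activity id is missing from activity_map (B raises the same KeyError there).
def Pre_build_hierarchical_prompt (activity_map : List (Int × String)) (phrase_map : List (Int × String)) (action_map : List (Int × Int × String)) (set_to_phrase : List (Int × Int)) : Prop :=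
  (action_map.all (fun e =>
    match (PySem.Dict.mk set_to_phrase).get? e.2.1 with
    | none => true
    | some pid =>
      if 0 ≤ pid ∧ pid ≤ 13 then
        activity_map.any (fun kv =>
          kv.1 == (if pid = 0 then (0 : Int) else if pid ≤ 4 then 1 else if pid ≤ 9 then 2 else 3))
      else true)) = true
instance (activity_map : List (Int × String)) (phrase_map : List (Int × String)) (action_map : List (Int × Int × String)) (set_to_phrase : List (Int × Int)) : Decidable (Pre_build_hierarchical_prompt activity_map phrase_map action_map set_to_phrase) := by unfold Pre_build_hierarchical_prompt; infer_instance

def pvWitness_build_hierarchical_prompt : (List (Int × String)) × (List (Int × String)) × (List (Int × Int × String)) × (List (Int × Int)) :=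
  ([(1, "F")], [(2, "s")], [(7, 3, "j")], [(3, 2)])

def Spec_build_hierarchical_prompt (activity_map : List (Int × String)) (phrase_map : List (Int × String)) (action_map : List (Int × Int × String)) (set_to_phrase : List (Int × Int)) (out : String) : Prop := out = build_hierarchical_prompt_alt activity_map phrase_map action_map set_to_phrase
instance (activity_map : List (Int × String)) (phrase_map : List (Int × String)) (action_map : List (Int × Int × String)) (set_to_phrase : List (Int × Int)) (out : String) : Decidable (Spec_build_hierarchical_prompt activity_map phrase_map action_map set_to_phrase out) := by unfold Spec_build_hierarchical_prompt; infer_instance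

-- ===== CLAIM (what is proved, stated in full; the proofs are below) =====
def Claim_equal_build_hierarchical_prompt : Prop := ∀ (activity_map : List (Int × String)) (phrase_map : List (Int × String)) (action_map : List (Int × Int × String)) (set_to_phrase : List (Int × Int)), Dom_build_hierarchical_prompt activity_map phrase_map action_map set_to_phrase → Pre_build_hierarchical_prompt activity_map phrase_map action_map set_to_phrase → Spec_build_hierarchical_prompt activity_map phrase_map action_map set_to_phrase (build_hierarchical_prompt activity_map phrase_map action_map set_to_phrase)

-- ===== LEMMAS AND PROOFS =====

-- abbreviation used only by the proofs
def pvHier (set_to_phrase : List (Int × Int)) (action_map : List (Int × Int × String)) :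
    PySem.Dict Int (PySem.Dict Int (List (Int × String))) :=
  action_map.foldl (pvHierStep set_to_phrase) PySem.Dict.empty

def pvBlock (set_to_phrase : List (Int × Int)) (action_map : List (Int × Int × String)) (phrase_map : List (Int × String)) (pid : Int) : List String :=
  pvPhraseLine phrase_map pid :: "  Actions:" :: (pvActs set_to_phrase action_map pid).map pvActionLine ++ [""]

def pvBodyB (set_to_phrase : List (Int × Int)) (action_map : List (Int × Int × String)) (phrase_map : List (Int × String)) (aid : Int) : List String :=
  (pvPhrasesOf aid).flatMap (fun pid =>
    if pvActs set_to_phrase action_map pid = [] then [] else pvBlock set_to_phrase action_map phrase_map pid)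

-- generic list helpers
theorem pv_flatMap_congr {α β : Type} {l : List α} {f g : α → List β}
    (h : ∀ x ∈ l, f x = g x) : l.flatMap f = l.flatMap g := by
  induction l with
  | nil => rfl
  | cons a t ih =>
    simp only [List.flatMap_cons]
    rw [h a (by simp), ih (fun x hx => h x (by simp [hx]))]

theorem pv_flatMap_filter {α β : Type} (l : List α) (p : α → Bool) (f : α → List β) :
    (l.filter p).flatMap f = l.flatMap (fun a => if p a then f a else []) := by
  induction l with
  | nil => rfl
  | cons a t ih =>
    by_cases h : p a <;> simp [h, ih]

-- taxonomy facts
theorem pv_actOf_cases (p : Int) :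
    get_activity_from_phrase p = -1 ∨ get_activity_from_phrase p = 0 ∨
    get_activity_from_phrase p = 1 ∨ get_activity_from_phrase p = 2 ∨
    get_activity_from_phrase p = 3 := by
  unfold get_activity_from_phrase; split_ifs <;> simp

theorem pv_mem_phrasesOf (a p : Int) (ha : a = 0 ∨ a = 1 ∨ a = 2 ∨ a = 3) :
    p ∈ pvPhrasesOf a ↔ get_activity_from_phrase p = a := by
  have h0 : pvPhrasesOf 0 = [0] := by norm_num [pvPhrasesOf]
  have h1 : pvPhrasesOf 1 = [1, 2, 3, 4] := by norm_num [pvPhrasesOf]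
  have h2 : pvPhrasesOf 2 = [5, 6, 7, 8, 9] := by norm_num [pvPhrasesOf]
  have h3 : pvPhrasesOf 3 = [10, 11, 12, 13] := by norm_num [pvPhrasesOf]
  rcases ha with rfl | rfl | rfl | rfl <;>
    simp only [h0, h1, h2, h3, List.mem_cons, List.not_mem_nil, or_false] <;>
    · unfold get_activity_from_phrase
      constructor
      · intro h; split_ifs <;> omega
      · intro h; split_ifs at h <;> omega

theorem pv_phrasesOf_pairwise (a : Int) : (pvPhrasesOf a).Pairwise (· < ·) := by
  unfold pvPhrasesOf; split_ifs <;> decide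

theorem pv_phrasesOf_nodup (a : Int) : (pvPhrasesOf a).Nodup := by
  unfold pvPhrasesOf; split_ifs <;> decide

theorem pv_acts_cons (stp : List (Int × Int)) (e : Int × Int × String)
    (t : List (Int × Int × String)) (pid : Int) :
    pvActs stp (e :: t) pid =
      (if (PySem.Dict.mk stp).get? e.2.1 = some pid then [(e.1, e.2.2)] else []) ++ pvActs stp t pid := by
  simp only [pvActs, List.filterMap_cons]
  split_ifs with h <;> simp [h]

theorem pv_acts_ne_nil_iff (stp : List (Int × Int)) (l : List (Int × Int × String)) (pid : Int) :
    pvActs stp l pid ≠ [] ↔ ∃ e ∈ l, (PySem.Dict.mk stp).get? e.2.1 = some pid := by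
  simp only [pvActs, ne_eq, List.filterMap_eq_nil_iff]
  push_neg
  constructor
  · rintro ⟨e, he, hne⟩
    refine ⟨e, he, ?_⟩
    by_contra h
    simp [h] at hne
  · rintro ⟨e, he, h⟩
    exact ⟨e, he, by simp [h]⟩

-- hierarchy-building invariants (induction over action_map, generalizing the accumulator)
theorem pv_hier_bucket (stp : List (Int × Int)) (l : List (Int × Int × String))
    (H : PySem.Dict Int (PySem.Dict Int (List (Int × String)))) (pid : Int)
    (hne : get_activity_from_phrase pid ≠ -1) :
    ((l.foldl (pvHierStep stp) H).getD (get_activity_from_phrase pid) PySem.Dict.empty).getD pid [] =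
      (H.getD (get_activity_from_phrase pid) PySem.Dict.empty).getD pid [] ++ pvActs stp l pid := by
  induction l generalizing H with
  | nil => simp [pvActs]
  | cons e t ih =>
    simp only [List.foldl_cons]
    rw [ih, pv_acts_cons]
    unfold pvHierStep
    cases hq : (PySem.Dict.mk stp).get? e.2.1 with
    | none => simp
    | some q =>
      simp only
      by_cases hq1 : get_activity_from_phrase q = -1
      · have hqp : ¬ q = pid := by intro h; rw [h] at hq1; exact hne hq1
        simp [hq1, hqp]
      · simp only [if_neg hq1]
        by_cases haq : get_activity_from_phrase q = get_activity_from_phrase pid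
        · rw [haq, PySem.Dict.getD_insert_self]
          by_cases hqp : q = pid
          · subst hqp
            rw [PySem.Dict.getD_insert_self]
            simp
          · have hpq : pid ≠ q := fun h => hqp h.symm
            rw [PySem.Dict.getD_insert_of_ne _ _ _ hpq]
            simp [hqp]
        · have hpa : get_activity_from_phrase pid ≠ get_activity_from_phrase q :=
            fun h => haq h.symm
          rw [PySem.Dict.getD_insert_of_ne _ _ _ hpa]
          have hqp : ¬ q = pid := fun h => haq (congrArg get_activity_from_phrase h)
          simp [hqp]

theorem pv_hier_mem_keys (stp : List (Int × Int)) (l : List (Int × Int × String))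
    (H : PySem.Dict Int (PySem.Dict Int (List (Int × String)))) (aid : Int) :
    aid ∈ (l.foldl (pvHierStep stp) H).keys ↔
      aid ∈ H.keys ∨ ∃ e ∈ l, ∃ q, (PySem.Dict.mk stp).get? e.2.1 = some q ∧
        get_activity_from_phrase q = aid ∧ aid ≠ -1 := by
  induction l generalizing H with
  | nil => simp
  | cons e t ih =>
    simp only [List.foldl_cons, List.mem_cons]
    rw [ih]
    unfold pvHierStep
    cases hq : (PySem.Dict.mk stp).get? e.2.1 with
    | none =>
      constructor
      · rintro (h | ⟨e', he', hrest⟩)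
        · exact Or.inl h
        · exact Or.inr ⟨e', Or.inr he', hrest⟩
      · rintro (h | ⟨e', (rfl | he'), hrest⟩)
        · exact Or.inl h
        · obtain ⟨q, hq', _⟩ := hrest
          rw [hq] at hq'; cases hq'
        · exact Or.inr ⟨e', he', hrest⟩
    | some q =>
      simp only
      by_cases hq1 : get_activity_from_phrase q = -1
      · simp only [if_pos hq1]
        constructor
        · rintro (h | ⟨e', he', hrest⟩)
          · exact Or.inl h
          · exact Or.inr ⟨e', Or.inr he', hrest⟩
        · rintro (h | ⟨e', (rfl | he'), q', hq', hact, hne⟩)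
          · exact Or.inl h
          · rw [hq] at hq'; cases hq'
            rw [← hact] at hne
            exact absurd hq1 hne
          · exact Or.inr ⟨e', he', q', hq', hact, hne⟩
      · simp only [if_neg hq1]
        rw [PySem.Dict.mem_keys_insert]
        constructor
        · rintro ((h | h) | ⟨e', he', hrest⟩)
          · exact Or.inr ⟨e, Or.inl rfl, q, hq, h.symm, by rw [h]; exact hq1⟩
          · exact Or.inl h
          · exact Or.inr ⟨e', Or.inr he', hrest⟩
        · rintro (h | ⟨e', (rfl | he'), q', hq', hact, hne⟩)
          · exact Or.inl (Or.inr h)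
          · rw [hq] at hq'; cases hq'
            exact Or.inl (Or.inl hact.symm)
          · exact Or.inr ⟨e', he', q', hq', hact, hne⟩

theorem pv_hier_mem_inner (stp : List (Int × Int)) (l : List (Int × Int × String))
    (H : PySem.Dict Int (PySem.Dict Int (List (Int × String)))) (aid pid : Int) :
    pid ∈ ((l.foldl (pvHierStep stp) H).getD aid PySem.Dict.empty).keys ↔
      pid ∈ (H.getD aid PySem.Dict.empty).keys ∨
        (get_activity_from_phrase pid = aid ∧ aid ≠ -1 ∧
          ∃ e ∈ l, (PySem.Dict.mk stp).get? e.2.1 = some pid) := by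
  induction l generalizing H with
  | nil => simp
  | cons e t ih =>
    simp only [List.foldl_cons, List.mem_cons]
    rw [ih]
    unfold pvHierStep
    cases hq : (PySem.Dict.mk stp).get? e.2.1 with
    | none =>
      constructor
      · rintro (h | ⟨h1, h2, e', he', h3⟩)
        · exact Or.inl h
        · exact Or.inr ⟨h1, h2, e', Or.inr he', h3⟩
      · rintro (h | ⟨h1, h2, e', (rfl | he'), h3⟩)
        · exact Or.inl h
        · rw [hq] at h3; cases h3
        · exact Or.inr ⟨h1, h2, e', he', h3⟩
    | some q =>
      simp only
      by_cases hq1 : get_activity_from_phrase q = -1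
      · simp only [if_pos hq1]
        constructor
        · rintro (h | ⟨h1, h2, e', he', h3⟩)
          · exact Or.inl h
          · exact Or.inr ⟨h1, h2, e', Or.inr he', h3⟩
        · rintro (h | ⟨h1, h2, e', (rfl | he'), h3⟩)
          · exact Or.inl h
          · rw [hq] at h3; cases h3
            rw [← h1] at h2
            exact absurd hq1 h2
          · exact Or.inr ⟨h1, h2, e', he', h3⟩
      · simp only [if_neg hq1]
        by_cases haid : aid = get_activity_from_phrase q
        · subst haid
          rw [PySem.Dict.getD_insert_self, PySem.Dict.mem_keys_insert]
          constructor
          · rintro ((h | h) | ⟨h1, h2, e', he', h3⟩)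
            · exact Or.inr ⟨congrArg get_activity_from_phrase h, hq1, e, Or.inl rfl,
                by rw [h]; exact hq⟩
            · exact Or.inl h
            · exact Or.inr ⟨h1, h2, e', Or.inr he', h3⟩
          · rintro (h | ⟨h1, h2, e', (rfl | he'), h3⟩)
            · exact Or.inl (Or.inr h)
            · rw [hq] at h3; cases h3
              exact Or.inl (Or.inl rfl)
            · exact Or.inr ⟨h1, h2, e', he', h3⟩
        · rw [PySem.Dict.getD_insert_of_ne _ _ _ haid]
          constructor
          · rintro (h | ⟨h1, h2, e', he', h3⟩)
            · exact Or.inl h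
            · exact Or.inr ⟨h1, h2, e', Or.inr he', h3⟩
          · rintro (h | ⟨h1, h2, e', (rfl | he'), h3⟩)
            · exact Or.inl h
            · rw [hq] at h3; cases h3
              exact absurd h1.symm haid
            · exact Or.inr ⟨h1, h2, e', he', h3⟩

theorem pv_hier_nodup_keys (stp : List (Int × Int)) (l : List (Int × Int × String))
    (H : PySem.Dict Int (PySem.Dict Int (List (Int × String)))) (h : H.keys.Nodup) :
    (l.foldl (pvHierStep stp) H).keys.Nodup := by
  induction l generalizing H with
  | nil => exact h
  | cons e t ih =>
    apply ih
    unfold pvHierStep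
    cases (PySem.Dict.mk stp).get? e.2.1 with
    | none => exact h
    | some q =>
      simp only
      split
      · exact h
      · exact PySem.Dict.nodup_keys_insert _ _ _ h

theorem pv_hier_nodup_inner (stp : List (Int × Int)) (l : List (Int × Int × String))
    (H : PySem.Dict Int (PySem.Dict Int (List (Int × String))))
    (h : ∀ a, (H.getD a PySem.Dict.empty).keys.Nodup) (a : Int) :
    ((l.foldl (pvHierStep stp) H).getD a PySem.Dict.empty).keys.Nodup := by
  induction l generalizing H with
  | nil => exact h a
  | cons e t ih =>
    apply ih
    intro b
    unfold pvHierStep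
    cases (PySem.Dict.mk stp).get? e.2.1 with
    | none => exact h b
    | some q =>
      simp only
      split
      · exact h b
      · rename_i hq1
        by_cases hb : b = get_activity_from_phrase q
        · subst hb
          rw [PySem.Dict.getD_insert_self]
          exact PySem.Dict.nodup_keys_insert _ _ _ (h _)
        · rw [PySem.Dict.getD_insert_of_ne _ _ _ hb]
          exact h b


theorem pv_witness_ok :
    Dom_build_hierarchical_prompt pvWitness_build_hierarchical_prompt.1 pvWitness_build_hierarchical_prompt.2.1 pvWitness_build_hierarchical_prompt.2.2.1 pvWitness_build_hierarchical_prompt.2.2.2 ∧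
    Pre_build_hierarchical_prompt pvWitness_build_hierarchical_prompt.1 pvWitness_build_hierarchical_prompt.2.1 pvWitness_build_hierarchical_prompt.2.2.1 pvWitness_build_hierarchical_prompt.2.2.2 := by
  decide

theorem pv_mem_keys_hier (stp : List (Int × Int)) (acm : List (Int × Int × String)) (a : Int) :
    a ∈ (pvHier stp acm).keys ↔
      ∃ pid, get_activity_from_phrase pid = a ∧ a ≠ -1 ∧ pvActs stp acm pid ≠ [] := by
  unfold pvHier
  rw [pv_hier_mem_keys]
  simp only [PySem.Dict.keys_empty, List.not_mem_nil, false_or]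
  constructor
  · rintro ⟨e, he, q, hq, hact, hne⟩
    exact ⟨q, hact, hne, (pv_acts_ne_nil_iff stp acm q).mpr ⟨e, he, hq⟩⟩
  · rintro ⟨q, hact, hne, hacts⟩
    obtain ⟨e, he, hq⟩ := (pv_acts_ne_nil_iff stp acm q).mp hacts
    exact ⟨e, he, q, hq, hact, hne⟩

theorem pv_mem_inner_hier (stp : List (Int × Int)) (acm : List (Int × Int × String)) (a p : Int) :
    p ∈ ((pvHier stp acm).getD a PySem.Dict.empty).keys ↔
      (get_activity_from_phrase p = a ∧ a ≠ -1 ∧ pvActs stp acm p ≠ []) := by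
  unfold pvHier
  rw [pv_hier_mem_inner]
  rw [PySem.Dict.getD_empty]
  simp only [PySem.Dict.keys_empty, List.not_mem_nil, false_or]
  rw [pv_acts_ne_nil_iff]

theorem pv_sorted_keys (stp : List (Int × Int)) (acm : List (Int × Int × String)) :
    PySem.List.sorted (pvHier stp acm).keys (fun x => x) false =
      ([0, 1, 2, 3] : List Int).filter (fun a => decide (a ∈ (pvHier stp acm).keys)) := by
  apply PySem.List.sorted_eq_of_perm_of_pairwise_lt
  · have h1 : (([0, 1, 2, 3] : List Int).filter (fun a => decide (a ∈ (pvHier stp acm).keys))).Nodup :=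
      List.Nodup.filter _ (by decide)
    have h2 : (pvHier stp acm).keys.Nodup :=
      pv_hier_nodup_keys stp acm PySem.Dict.empty (by simp)
    rw [List.perm_ext_iff_of_nodup h1 h2]
    intro a
    rw [List.mem_filter]
    simp only [decide_eq_true_eq]
    constructor
    · exact fun h => h.2
    · intro h
      refine ⟨?_, h⟩
      obtain ⟨q, hact, hne, -⟩ := (pv_mem_keys_hier stp acm a).mp h
      rcases pv_actOf_cases q with h' | h' | h' | h' | h' <;> rw [h'] at hact <;>
        first
          | exact absurd hact.symm hne
          | simp [← hact]
  · exact List.Pairwise.filter _ (by decide)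

theorem pv_sorted_inner (stp : List (Int × Int)) (acm : List (Int × Int × String)) (a : Int)
    (ha : a = 0 ∨ a = 1 ∨ a = 2 ∨ a = 3) :
    PySem.List.sorted ((pvHier stp acm).getD a PySem.Dict.empty).keys (fun x => x) false =
      (pvPhrasesOf a).filter (fun p => decide (pvActs stp acm p ≠ [])) := by
  have hne1 : a ≠ -1 := by rcases ha with rfl | rfl | rfl | rfl <;> decide
  apply PySem.List.sorted_eq_of_perm_of_pairwise_lt
  · have h1 : ((pvPhrasesOf a).filter (fun p => decide (pvActs stp acm p ≠ []))).Nodup :=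
      List.Nodup.filter _ (pv_phrasesOf_nodup a)
    have h2 : ((pvHier stp acm).getD a PySem.Dict.empty).keys.Nodup :=
      pv_hier_nodup_inner stp acm PySem.Dict.empty (by simp) a
    rw [List.perm_ext_iff_of_nodup h1 h2]
    intro p
    rw [List.mem_filter, pv_mem_inner_hier, pv_mem_phrasesOf a p ha]
    simp only [decide_eq_true_eq]
    constructor
    · rintro ⟨h1, h2⟩; exact ⟨h1, hne1, h2⟩
    · rintro ⟨h1, -, h2⟩; exact ⟨h1, h2⟩
  · exact List.Pairwise.filter _ (pv_phrasesOf_pairwise a)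

theorem pv_bucket_hier (stp : List (Int × Int)) (acm : List (Int × Int × String)) (a p : Int)
    (hact : get_activity_from_phrase p = a) (hne1 : a ≠ -1) :
    ((pvHier stp acm).getD a PySem.Dict.empty).getD p [] = pvActs stp acm p := by
  unfold pvHier
  rw [← hact] at hne1 ⊢
  rw [pv_hier_bucket stp acm PySem.Dict.empty p hne1]
  simp

set_option maxHeartbeats 2000000 in
theorem pv_A_lines (am pm : List (Int × String)) (acm : List (Int × Int × String))
    (stp : List (Int × Int)) :
    build_hierarchical_prompt am pm acm stp =
      PySem.Str.join "\n" (pvHeader ++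
        (PySem.List.sorted (pvHier stp acm).keys (fun x => x) false).flatMap (fun aid =>
          pvActivityLine am aid ::
            (PySem.List.sorted ((pvHier stp acm).getD aid PySem.Dict.empty).keys (fun x => x) false).flatMap
              (fun pid =>
                pvPhraseLine pm pid :: "  Actions:" ::
                  ((((pvHier stp acm).getD aid PySem.Dict.empty).getD pid []).map pvActionLine ++ [""]))) ++
        pvInstr) := by
  have hinner : ∀ (inner : PySem.Dict Int (List (Int × String))) (ls : List String),
      (PySem.List.sorted inner.keys (fun x => x) false).foldl (fun ls pid =>
        ((inner.getD pid []).foldl (fun ls a => ls ++ [pvActionLine a])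
          (ls ++ [pvPhraseLine pm pid, "  Actions:"])) ++ [""]) ls =
      ls ++ (PySem.List.sorted inner.keys (fun x => x) false).flatMap (fun pid =>
        pvPhraseLine pm pid :: "  Actions:" :: ((inner.getD pid []).map pvActionLine ++ [""])) := by
    intro inner ls
    rw [PySem.List.foldl_congr_mem' _ _
      (fun ls pid => ls ++ (pvPhraseLine pm pid :: "  Actions:" ::
        ((inner.getD pid []).map pvActionLine ++ [""]))) _
      (by intro pid hpid acc
          rw [PySem.List.foldl_append_singleton_eq_map]
          simp)]
    exact PySem.List.foldl_append_eq_flatMap _ _ _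
  unfold build_hierarchical_prompt
  have hH : acm.foldl (pvHierStep stp) PySem.Dict.empty = pvHier stp acm := rfl
  rw [hH]
  dsimp only
  rw [PySem.List.foldl_congr_mem' _ _
    (fun ls aid => ls ++ (pvActivityLine am aid ::
      (PySem.List.sorted ((pvHier stp acm).getD aid PySem.Dict.empty).keys (fun x => x) false).flatMap
        (fun pid => pvPhraseLine pm pid :: "  Actions:" ::
          ((((pvHier stp acm).getD aid PySem.Dict.empty).getD pid []).map pvActionLine ++ [""])))) _
    (by intro aid haid acc
        dsimp only
        rw [hinner]
        simp)]
  rw [PySem.List.foldl_append_eq_flatMap, List.append_assoc]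

set_option maxHeartbeats 2000000 in
theorem pv_B_lines (am pm : List (Int × String)) (acm : List (Int × Int × String))
    (stp : List (Int × Int)) :
    build_hierarchical_prompt_alt am pm acm stp =
      PySem.Str.join "\n" (pvHeader ++
        ([0, 1, 2, 3] : List Int).flatMap (fun aid =>
          if pvBodyB stp acm pm aid = [] then []
          else pvActivityLine am aid :: pvBodyB stp acm pm aid) ++ pvInstr) := by
  have hinner : ∀ (aid : Int),
      (pvPhrasesOf aid).foldl (fun body pid =>
        if pvActs stp acm pid = [] then body
        else body ++ pvPhraseLine pm pid :: "  Actions:" :: (pvActs stp acm pid).map pvActionLine ++ [""])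
        ([] : List String) = pvBodyB stp acm pm aid := by
    intro aid
    rw [PySem.List.foldl_congr_mem' _ _
      (fun body pid => body ++ (if pvActs stp acm pid = [] then []
        else pvBlock stp acm pm pid)) _
      (by intro pid hpid acc
          by_cases h : pvActs stp acm pid = [] <;> simp [h, pvBlock])]
    rw [PySem.List.foldl_append_eq_flatMap]
    rfl
  unfold build_hierarchical_prompt_alt
  dsimp only
  rw [PySem.List.foldl_congr_mem' _ _
    (fun ls aid => ls ++ (if pvBodyB stp acm pm aid = [] then []
      else pvActivityLine am aid :: pvBodyB stp acm pm aid)) _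
    (by intro aid haid acc
        dsimp only
        rw [hinner aid]
        by_cases h : pvBodyB stp acm pm aid = [] <;> simp [h])]
  rw [PySem.List.foldl_append_eq_flatMap, List.append_assoc]

theorem pv_body_eq (am pm : List (Int × String)) (acm : List (Int × Int × String))
    (stp : List (Int × Int)) :
    (PySem.List.sorted (pvHier stp acm).keys (fun x => x) false).flatMap (fun aid =>
      pvActivityLine am aid ::
        (PySem.List.sorted ((pvHier stp acm).getD aid PySem.Dict.empty).keys (fun x => x) false).flatMap
          (fun pid =>
            pvPhraseLine pm pid :: "  Actions:" ::
              ((((pvHier stp acm).getD aid PySem.Dict.empty).getD pid []).map pvActionLine ++ [""]))) =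
    ([0, 1, 2, 3] : List Int).flatMap (fun aid =>
      if pvBodyB stp acm pm aid = [] then []
      else pvActivityLine am aid :: pvBodyB stp acm pm aid) := by
  rw [pv_sorted_keys, pv_flatMap_filter]
  apply pv_flatMap_congr
  intro a ha
  have ha4 : a = 0 ∨ a = 1 ∨ a = 2 ∨ a = 3 := by
    simpa using ha
  have hne1 : a ≠ -1 := by rcases ha4 with rfl | rfl | rfl | rfl <;> decide
  by_cases hk : a ∈ (pvHier stp acm).keys
  · have hbody :
        (PySem.List.sorted ((pvHier stp acm).getD a PySem.Dict.empty).keys (fun x => x) false).flatMap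
          (fun pid =>
            pvPhraseLine pm pid :: "  Actions:" ::
              ((((pvHier stp acm).getD a PySem.Dict.empty).getD pid []).map pvActionLine ++ [""])) =
        pvBodyB stp acm pm a := by
      rw [pv_sorted_inner stp acm a ha4, pv_flatMap_filter]
      unfold pvBodyB
      apply pv_flatMap_congr
      intro p hp
      have hact : get_activity_from_phrase p = a := (pv_mem_phrasesOf a p ha4).mp hp
      by_cases hacts : pvActs stp acm p = []
      · simp [hacts]
      · simp only [hacts, ne_eq, not_false_eq_true, decide_true, if_true]
        rw [pv_bucket_hier stp acm a p hact hne1]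
        rfl
    have hne : pvBodyB stp acm pm a ≠ [] := by
      obtain ⟨q, hact, -, hacts⟩ := (pv_mem_keys_hier stp acm a).mp hk
      intro hnil
      unfold pvBodyB at hnil
      rw [List.flatMap_eq_nil_iff] at hnil
      have hq := hnil q ((pv_mem_phrasesOf a q ha4).mpr hact)
      rw [if_neg hacts] at hq
      simp [pvBlock] at hq
    rw [if_pos (by simpa using hk), if_neg hne, hbody]
  · have hempty : pvBodyB stp acm pm a = [] := by
      unfold pvBodyB
      rw [List.flatMap_eq_nil_iff]
      intro p hp
      by_cases hacts : pvActs stp acm p = []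
      · rw [if_pos hacts]
      · exact absurd ((pv_mem_keys_hier stp acm a).mpr
          ⟨p, (pv_mem_phrasesOf a p ha4).mp hp, hne1, hacts⟩) hk
    rw [if_neg (by simpa using hk), hempty]
    simp


-- ===== VERDICT (by name: the statement is the Claim_ definition above) =====
theorem build_hierarchical_prompt_spec : Claim_equal_build_hierarchical_prompt := by
  intro activity_map phrase_map action_map set_to_phrase hdom hpre
  unfold Spec_build_hierarchical_prompt
  rw [pv_A_lines, pv_B_lines, pv_body_eq]
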